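-- pv_equiv track=rewrite | github.com/SeBaS2x/1er_Cuatrimestre_progrmacion | clase_11 y 12/Ordenamientos/ordenamiento_desafios.py | ordenar_vector_con_nega
-- ===== SOURCE A (Python) =====
-- def ordenar_vector(vector:list, opcional = True)->list:
--
--     for i in range(len(vector)-1):
--         for j in range(i+1,len(vector),1):
--             if opcional:
--                 if vector[i] >vector[j]:
--                     aux = vector[i]
--                     vector[i]= vector[j]
--                     vector[j]= aux
--             else:
--                 if vector[i] < vector[j]:
--                     aux = vector[i]
--                     vector[i]= vector[j]
--                     vector[j]= aux
--     return vector
--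
-- def ordenar_vector_con_nega(vector:list, )->list:
--     lista_nueva_negativos =[]
--     lista_nueva_positivos = []
--     for i in range(len(vector)):
--         if vector[i] < 0:
--             lista_nueva_negativos += [vector[i]]
--         else:
--             lista_nueva_positivos +=[vector[i]]
--     orden_negativo= ordenar_vector(lista_nueva_negativos, False)
--     orden_positivo= ordenar_vector(lista_nueva_positivos)
--     vector = orden_negativo + orden_positivo
--
--     return vector
-- ===== SOURCE B (Python) =====
-- def ordenar_vector_con_nega(vector: list) -> list:
--     # One keyed sort: negatives first (descending), then non-negatives ascending.
--     return sorted(vector, key=lambda x: (0, -x) if x < 0 else (1, x))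
-- ===== Notes on version B (the rewrite author's own statement) =====
-- stated objective: simpler
-- what changed: Replaces the partition-into-two-lists plus two hand-written quadratic selection/bubble sorts plus concatenation with a single sorted() call over the whole list using the composite key (0,-x) for negatives and (1,x) for non-negatives.
import Mathlib
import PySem

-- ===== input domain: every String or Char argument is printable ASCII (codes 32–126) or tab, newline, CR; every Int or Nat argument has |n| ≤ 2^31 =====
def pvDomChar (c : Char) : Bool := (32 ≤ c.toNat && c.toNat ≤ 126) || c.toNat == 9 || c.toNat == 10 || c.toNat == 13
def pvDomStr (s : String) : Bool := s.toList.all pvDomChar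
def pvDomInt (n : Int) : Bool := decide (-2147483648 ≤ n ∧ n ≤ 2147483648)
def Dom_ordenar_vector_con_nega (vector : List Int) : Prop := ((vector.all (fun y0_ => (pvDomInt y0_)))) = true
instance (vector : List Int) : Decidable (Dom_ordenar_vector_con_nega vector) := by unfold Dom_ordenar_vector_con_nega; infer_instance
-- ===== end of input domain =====

-- B replaces A's partition + two hand-written quadratic selection sorts + concatenation with a
-- single keyed sorted() call ((0,-x) for negatives, (1,x) otherwise); A mutates only its two
-- internal partition lists, so the equivalence proved here is about the return value.


-- ===== PORT A =====
-- Inner loop of A's ordenar_vector at outer index i: 'for j in range(i+1, len(vector))'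
-- compares vector[i] (the running value vi) with each later element, swapping on the branch
-- condition.  The vector state is represented as position i's current value plus the suffix
-- after i; the same comparisons and swaps happen in the same order as in the Python.
def pvInner (opcional : Bool) (vi : Int) : List Int → Int × List Int
  | [] => (vi, [])
  | t :: ts =>
    if opcional then
      if vi > t then
        let p := pvInner opcional t ts; (p.1, vi :: p.2)
      else
        let p := pvInner opcional vi ts; (p.1, t :: p.2)
    else
      if vi < t then
        let p := pvInner opcional t ts; (p.1, vi :: p.2)
      else
        let p := pvInner opcional vi ts; (p.1, t :: p.2)

-- termination measure for the outer loop (cited by decreasing_by below)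
theorem pvInner_snd_length (opcional : Bool) (vi : Int) (ts : List Int) :
    (pvInner opcional vi ts).2.length = ts.length := by
  induction ts generalizing vi with
  | nil => rfl
  | cons t ts ih => simp only [pvInner]; split_ifs <;> simp [ih]

-- Outer loop 'for i in range(len(vector)-1)': after the inner pass at i, position i is final;
-- the loop continues on the remaining suffix.
def ordenar_vector_A : List Int → Bool → List Int
  | [], _ => []
  | h :: t, opcional =>
    let p := pvInner opcional h t
    p.1 :: ordenar_vector_A p.2 opcional
termination_by v => v.length
decreasing_by simp [pvInner_snd_length]

def ordenar_vector_con_nega (vector : List Int) : List Int :=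
  -- partition loop: 'for i in range(len(vector)): if vector[i] < 0: … += [vector[i]] else: …'
  let p := vector.foldl
    (fun (acc : List Int × List Int) x =>
      if x < 0 then (acc.1 ++ [x], acc.2) else (acc.1, acc.2 ++ [x])) ([], [])
  let orden_negativo := ordenar_vector_A p.1 false
  let orden_positivo := ordenar_vector_A p.2 true
  orden_negativo ++ orden_positivo

-- ===== PORT B =====
-- key=lambda x: (0, -x) if x < 0 else (1, x); Python tuple comparison is lexicographic = Lex
def pvKey (x : Int) : Lex (Int × Int) := toLex (if x < 0 then (0, -x) else (1, x))

def ordenar_vector_con_nega_alt (vector : List Int) : List Int :=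
  PySem.List.sorted vector pvKey

-- ===== PRECONDITION & SPEC =====
def Spec_ordenar_vector_con_nega (vector : List Int) (out : List Int) : Prop := out = ordenar_vector_con_nega_alt vector
instance (vector : List Int) (out : List Int) : Decidable (Spec_ordenar_vector_con_nega vector out) := by unfold Spec_ordenar_vector_con_nega; infer_instance

-- ===== CLAIM (what is proved, stated in full; the proofs are below) =====
def Claim_equal_ordenar_vector_con_nega : Prop := ∀ (vector : List Int), Dom_ordenar_vector_con_nega vector → Spec_ordenar_vector_con_nega vector (ordenar_vector_con_nega vector)

-- ===== LEMMAS AND PROOFS =====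

theorem pvKey_injective : Function.Injective pvKey := by
  intro a b h
  unfold pvKey at h
  have h' := congrArg (fun z : Lex (Int × Int) => ofLex z) h
  simp only [ofLex_toLex] at h'
  split_ifs at h' <;> simp only [Prod.mk.injEq] at h' <;> omega

theorem pvKey_le_iff (a b : Int) : pvKey a ≤ pvKey b ↔
    ((a < 0 ∧ 0 ≤ b) ∨ (a < 0 ∧ b < 0 ∧ b ≤ a) ∨ (0 ≤ a ∧ 0 ≤ b ∧ a ≤ b)) := by
  unfold pvKey
  split_ifs with h1 h2 h2 <;> rw [Prod.Lex.toLex_le_toLex] <;> simp <;> omega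

theorem pvInner_perm (opcional : Bool) (vi : Int) (ts : List Int) :
    ((pvInner opcional vi ts).1 :: (pvInner opcional vi ts).2).Perm (vi :: ts) := by
  induction ts generalizing vi with
  | nil => simp [pvInner]
  | cons t ts ih =>
    simp only [pvInner]
    split_ifs <;>
      first
        | exact (List.Perm.swap vi _ _).trans ((ih t).cons vi)
        | exact ((List.Perm.swap t _ _).trans ((ih vi).cons t)).trans (List.Perm.swap vi t ts)

theorem ordenar_vector_A_cons (h : Int) (t : List Int) (opcional : Bool) :
    ordenar_vector_A (h :: t) opcional
      = (pvInner opcional h t).1 :: ordenar_vector_A (pvInner opcional h t).2 opcional := by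
  rw [ordenar_vector_A]

theorem pvInner_min_true (vi : Int) (ts : List Int) :
    ∀ y ∈ vi :: ts, (pvInner true vi ts).1 ≤ y := by
  induction ts generalizing vi with
  | nil => simp [pvInner]
  | cons t ts ih =>
    intro y hy
    simp only [List.mem_cons] at hy
    simp only [pvInner, if_true]
    split_ifs with h
    · have hm := ih t
      rcases hy with rfl | rfl | hy
      · exact le_trans (hm t (by simp)) (by omega)
      · exact hm _ (by simp)
      · exact hm _ (by simp [hy])
    · have hm := ih vi
      rcases hy with rfl | rfl | hy
      · exact hm _ (by simp)
      · exact le_trans (hm vi (by simp)) (by omega)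
      · exact hm _ (by simp [hy])

theorem pvInner_max_false (vi : Int) (ts : List Int) :
    ∀ y ∈ vi :: ts, y ≤ (pvInner false vi ts).1 := by
  induction ts generalizing vi with
  | nil => simp [pvInner]
  | cons t ts ih =>
    intro y hy
    simp only [List.mem_cons] at hy
    simp only [pvInner, Bool.false_eq_true, if_false]
    split_ifs with h
    · have hm := ih t
      rcases hy with rfl | rfl | hy
      · exact le_trans (by omega) (hm t (by simp))
      · exact hm _ (by simp)
      · exact hm _ (by simp [hy])
    · have hm := ih vi
      rcases hy with rfl | rfl | hy
      · exact hm _ (by simp)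
      · exact le_trans (by omega) (hm vi (by simp))
      · exact hm _ (by simp [hy])

theorem ordenar_vector_A_perm (v : List Int) (opcional : Bool) :
    (ordenar_vector_A v opcional).Perm v := by
  induction v, opcional using ordenar_vector_A.induct with
  | case1 _ => simp [ordenar_vector_A]
  | case2 h t opcional p ih =>
    rw [ordenar_vector_A_cons]
    exact (List.Perm.cons _ ih).trans (pvInner_perm opcional h t)

theorem ordenar_vector_A_sorted_true (v : List Int) :
    (ordenar_vector_A v true).Pairwise (· ≤ ·) := by
  suffices H : ∀ (opcional : Bool) (v : List Int), opcional = true →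
      (ordenar_vector_A v opcional).Pairwise (· ≤ ·) from H true v rfl
  intro opcional v
  induction v, opcional using ordenar_vector_A.induct with
  | case1 _ => intro _; simp [ordenar_vector_A]
  | case2 h t opcional p ih =>
    intro hopc; subst hopc
    rw [ordenar_vector_A_cons]
    refine List.pairwise_cons.2 ⟨?_, ih rfl⟩
    intro y hy
    have hy2 : y ∈ (pvInner true h t).2 :=
      ((ordenar_vector_A_perm _ true).mem_iff).1 hy
    have hmem : y ∈ h :: t :=
      ((pvInner_perm true h t).mem_iff).1 (by simp [hy2])
    exact pvInner_min_true h t y hmem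

theorem ordenar_vector_A_sorted_false (v : List Int) :
    (ordenar_vector_A v false).Pairwise (fun a b => b ≤ a) := by
  suffices H : ∀ (opcional : Bool) (v : List Int), opcional = false →
      (ordenar_vector_A v opcional).Pairwise (fun a b => b ≤ a) from H false v rfl
  intro opcional v
  induction v, opcional using ordenar_vector_A.induct with
  | case1 _ => intro _; simp [ordenar_vector_A]
  | case2 h t opcional p ih =>
    intro hopc; subst hopc
    rw [ordenar_vector_A_cons]
    refine List.pairwise_cons.2 ⟨?_, ih rfl⟩
    intro y hy
    have hy2 : y ∈ (pvInner false h t).2 :=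
      ((ordenar_vector_A_perm _ false).mem_iff).1 hy
    have hmem : y ∈ h :: t :=
      ((pvInner_perm false h t).mem_iff).1 (by simp [hy2])
    exact pvInner_max_false h t y hmem

theorem pvPartition (v : List Int) (a b : List Int) :
    v.foldl (fun (acc : List Int × List Int) x =>
        if x < 0 then (acc.1 ++ [x], acc.2) else (acc.1, acc.2 ++ [x])) (a, b)
      = (a ++ v.filter (fun x => decide (x < 0)), b ++ v.filter (fun x => !decide (x < 0))) := by
  induction v generalizing a b with
  | nil => simp
  | cons x v ih =>
    simp only [List.foldl_cons, List.filter_cons]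
    by_cases h : x < 0 <;> simp [h, ih]

-- ===== VERDICT (by name: the statement is the Claim_ definition above) =====
theorem ordenar_vector_con_nega_spec : Claim_equal_ordenar_vector_con_nega := by
  intro v _
  unfold Spec_ordenar_vector_con_nega ordenar_vector_con_nega ordenar_vector_con_nega_alt
  simp only [pvPartition v [] [], List.nil_append]
  set negs := v.filter (fun x => decide (x < 0)) with hnegs
  set poss := v.filter (fun x => !decide (x < 0)) with hposs
  have hnm : ∀ x ∈ negs, x < 0 := by intro x hx; simpa using (List.mem_filter.1 hx).2
  have hpm : ∀ x ∈ poss, ¬ x < 0 := by intro x hx; simpa using (List.mem_filter.1 hx).2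
  apply PySem.List.eq_of_perm_of_pairwise_le_of_injective pvKey pvKey_injective
  · exact ((ordenar_vector_A_perm negs false).append (ordenar_vector_A_perm poss true)).trans
      ((List.filter_append_perm _ v).trans (PySem.List.sorted_perm v pvKey false).symm)
  · rw [List.pairwise_append]
    refine ⟨?_, ?_, ?_⟩
    · refine (ordenar_vector_A_sorted_false negs).imp_of_mem ?_
      intro a b ha hb hab
      have ha' := hnm a (((ordenar_vector_A_perm negs false).mem_iff).1 ha)
      have hb' := hnm b (((ordenar_vector_A_perm negs false).mem_iff).1 hb)
      rw [pvKey_le_iff]; omega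
    · refine (ordenar_vector_A_sorted_true poss).imp_of_mem ?_
      intro a b ha hb hab
      have ha' := hpm a (((ordenar_vector_A_perm poss true).mem_iff).1 ha)
      have hb' := hpm b (((ordenar_vector_A_perm poss true).mem_iff).1 hb)
      rw [pvKey_le_iff]; omega
    · intro a ha b hb
      have ha' := hnm a (((ordenar_vector_A_perm negs false).mem_iff).1 ha)
      have hb' := hpm b (((ordenar_vector_A_perm poss true).mem_iff).1 hb)
      rw [pvKey_le_iff]; omega
  · exact PySem.List.sorted_pairwise v pvKey
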